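-- pv_equiv track=rewrite | github.com/onyinyechiekezie/pythonClass | ClassTasks/fourthtask.py | get_mix_upper
-- ===== SOURCE A (Python) =====
-- def get_mix_upper(string):
--     upper = ""
--     lower = ""
--     for char in string:
--         if char.isupper():
--             upper += char
--         else:
--             lower += char
--     return upper + lower
-- ===== SOURCE B (Python) =====
-- def get_mix_upper(string):
--     return "".join(sorted(string, key=lambda c: not c.isupper()))
-- ===== Notes on version B (the rewrite author's own statement) =====
-- stated objective: idiomatic
-- what changed: Replaces the manual two-accumulator partition loop with a one-line stable sort keyed on the negated uppercase test, which puts uppercase characters first while preserving relative order.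
import Mathlib
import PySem

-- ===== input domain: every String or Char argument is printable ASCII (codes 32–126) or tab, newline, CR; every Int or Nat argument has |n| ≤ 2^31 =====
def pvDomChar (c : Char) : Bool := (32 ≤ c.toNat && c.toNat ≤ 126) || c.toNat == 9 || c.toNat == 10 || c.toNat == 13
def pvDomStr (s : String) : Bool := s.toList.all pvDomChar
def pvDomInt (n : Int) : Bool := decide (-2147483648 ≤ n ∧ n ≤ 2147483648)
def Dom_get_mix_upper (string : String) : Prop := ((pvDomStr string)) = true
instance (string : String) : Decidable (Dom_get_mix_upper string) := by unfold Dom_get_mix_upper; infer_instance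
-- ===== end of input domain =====

-- B replaces A's manual two-accumulator partition loop with an idiomatic one-line
-- stable sort by the boolean key 'not c.isupper()' (uppercase first, order preserved).

-- ===== PORT A =====
-- for char in string: append to 'upper' or 'lower'; return upper + lower
def get_mix_upper (string : String) : String :=
  let r := string.toList.foldl
    (fun (acc : List Char × List Char) c =>
      if PySem.Chars.isupper c then (acc.1 ++ [c], acc.2) else (acc.1, acc.2 ++ [c]))
    ([], [])
  String.mk (r.1 ++ r.2)

-- ===== PORT B =====
-- "".join(sorted(string, key=lambda c: not c.isupper()))
def get_mix_upper_alt (string : String) : String :=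
  String.mk (PySem.List.sorted string.toList (fun c => !PySem.Chars.isupper c) false)

-- ===== PRECONDITION & SPEC =====
def Spec_get_mix_upper (string : String) (out : String) : Prop := out = get_mix_upper_alt string
instance (string : String) (out : String) : Decidable (Spec_get_mix_upper string out) := by unfold Spec_get_mix_upper; infer_instance

-- ===== CLAIM (what is proved, stated in full; the proofs are below) =====
def Claim_equal_get_mix_upper : Prop := ∀ (string : String), Dom_get_mix_upper string → Spec_get_mix_upper string (get_mix_upper string)

-- ===== LEMMAS AND PROOFS =====

-- A's fold, started from (u, l), appends the uppercase and non-uppercase filters.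
theorem pvFoldA (xs : List Char) (u l : List Char) :
    xs.foldl
      (fun (acc : List Char × List Char) c =>
        if PySem.Chars.isupper c then (acc.1 ++ [c], acc.2) else (acc.1, acc.2 ++ [c]))
      (u, l)
    = (u ++ xs.filter (fun c => PySem.Chars.isupper c),
       l ++ xs.filter (fun c => !PySem.Chars.isupper c)) := by
  induction xs generalizing u l with
  | nil => simp
  | cons c xs ih =>
    by_cases h : PySem.Chars.isupper c = true <;>
      simp [List.foldl_cons, h, ih]

-- inserting an uppercase char into (uppers ++ lowers) puts it after the uppers
theorem pvInsertUpper (x : Char) (us ls : List Char)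
    (hx : PySem.Chars.isupper x = true)
    (hus : ∀ u ∈ us, PySem.Chars.isupper u = true)
    (hls : ∀ l ∈ ls, PySem.Chars.isupper l = false) :
    PySem.List.insertBy
      (fun a b => decide ((!PySem.Chars.isupper a) < (!PySem.Chars.isupper b))) x (us ++ ls)
    = us ++ x :: ls := by
  induction us with
  | nil =>
    cases ls with
    | nil => simp [PySem.List.insertBy]
    | cons l ls' =>
      have hl := hls l (by simp)
      simp [PySem.List.insertBy, hx, hl, Bool.lt_iff]
  | cons u us' ih =>
    have hu := hus u (by simp)
    have : (decide ((!PySem.Chars.isupper x) < (!PySem.Chars.isupper u))) = false := by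
      simp [hx, hu]
    simp only [List.cons_append, PySem.List.insertBy, this, Bool.false_eq_true, if_false]
    rw [ih (fun a ha => hus a (by simp [ha]))]

-- inserting a non-uppercase char appends it at the very end
theorem pvInsertLower (x : Char) (us ls : List Char)
    (hx : PySem.Chars.isupper x = false) :
    PySem.List.insertBy
      (fun a b => decide ((!PySem.Chars.isupper a) < (!PySem.Chars.isupper b))) x (us ++ ls)
    = (us ++ ls) ++ [x] := by
  apply PySem.List.insertBy_of_forall_not_before
  intro y _
  simp [hx, Bool.lt_iff]

-- the sort-fold invariant: starting from a partitioned accumulator it stays partitioned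
theorem pvFoldB (xs : List Char) (us ls : List Char)
    (hus : ∀ u ∈ us, PySem.Chars.isupper u = true)
    (hls : ∀ l ∈ ls, PySem.Chars.isupper l = false) :
    xs.foldl
      (fun acc x =>
        PySem.List.insertBy
          (fun a b => decide ((!PySem.Chars.isupper a) < (!PySem.Chars.isupper b))) x acc)
      (us ++ ls)
    = (us ++ xs.filter (fun c => PySem.Chars.isupper c))
      ++ (ls ++ xs.filter (fun c => !PySem.Chars.isupper c)) := by
  induction xs generalizing us ls with
  | nil => simp
  | cons c xs ih =>
    by_cases h : PySem.Chars.isupper c = true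
    · rw [List.foldl_cons, pvInsertUpper c us ls h hus hls]
      have : us ++ c :: ls = (us ++ [c]) ++ ls := by simp
      rw [this, ih (us ++ [c]) ls
        (by intro u hu; rcases List.mem_append.mp hu with h' | h'
            · exact hus u h'
            · simp at h'; subst h'; exact h)
        hls]
      simp [h]
    · rw [List.foldl_cons, pvInsertLower c us ls (by simpa using h), List.append_assoc]
      rw [ih us (ls ++ [c]) hus
        (by intro l hl; rcases List.mem_append.mp hl with h' | h'
            · exact hls l h'
            · simp at h'; subst h'; simpa using h)]
      simp [h]

theorem pvSortedPartition (xs : List Char) :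
    PySem.List.sorted xs (fun c => !PySem.Chars.isupper c) false
    = xs.filter (fun c => PySem.Chars.isupper c)
      ++ xs.filter (fun c => !PySem.Chars.isupper c) := by
  rw [PySem.List.sorted_eq_foldl_insertBy]
  have := pvFoldB xs [] [] (by simp) (by simp)
  simpa using this

-- ===== VERDICT (by name: the statement is the Claim_ definition above) =====
theorem get_mix_upper_spec : Claim_equal_get_mix_upper := by
  intro s _
  unfold Spec_get_mix_upper get_mix_upper get_mix_upper_alt
  rw [pvSortedPartition, pvFoldA]
  simp
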